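-- pv_equiv track=rewrite | github.com/kerenzhou062/ENCORI | miRNA-target/python/miRtargetFilter.py | MirnaPosTag
-- ===== SOURCE A (Python) =====
-- def MirnaPosTag(mirnaSeq, pos):
--     mirnaSeqRev = mirnaSeq[::-1]
--     indexFlag = 0
--     count = 0
--     for i in range(len(mirnaSeqRev)):
--         if count == pos:
--             indexFlag = i
--             break
--         else:
--             if mirnaSeqRev[i] == '-':
--                 continue
--             else:
--                 count += 1
--     return indexFlag
-- ===== SOURCE B (Python) =====
-- def MirnaPosTag(mirnaSeq, pos):
--     rev = mirnaSeq[::-1]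
--     counts = []
--     nondash = 0
--     for c in rev:
--         counts.append(nondash)
--         nondash += (c != '-')
--     return next((i for i, k in enumerate(counts) if k == pos), 0)
-- ===== Notes on version B (the rewrite author's own statement) =====
-- stated objective: alternative
-- what changed: Replaces A's interleaved count-and-break scan with a two-pass decomposition: first build the table of prefix non-dash counts of the reversed string, then return the first index whose count equals pos (default 0).
import Mathlib
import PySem

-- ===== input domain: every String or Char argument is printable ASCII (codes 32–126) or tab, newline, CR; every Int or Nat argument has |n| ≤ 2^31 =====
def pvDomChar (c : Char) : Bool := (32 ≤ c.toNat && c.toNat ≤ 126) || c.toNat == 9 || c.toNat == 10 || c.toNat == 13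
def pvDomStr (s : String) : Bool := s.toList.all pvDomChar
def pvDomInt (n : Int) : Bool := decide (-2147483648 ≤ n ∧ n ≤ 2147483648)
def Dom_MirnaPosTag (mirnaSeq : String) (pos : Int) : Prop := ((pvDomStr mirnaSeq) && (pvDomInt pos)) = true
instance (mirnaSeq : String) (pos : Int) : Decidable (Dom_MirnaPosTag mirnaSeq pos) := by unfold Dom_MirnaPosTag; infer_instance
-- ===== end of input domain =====

-- B replaces A's interleaved count-and-break scan with a two-pass decomposition:
-- build the prefix non-dash-count table of the reversed string, then take the first
-- index whose count equals pos (default 0); alternative structure, same O(n) cost.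

-- ===== PORT A =====
-- A's for-loop: state (count, i); the break returns i, a normal exit returns indexFlag = 0
def pvGoA (pos : Int) : List Char → Int → Int → Int
  | [], _, _ => 0
  | c :: rest, count, i =>
      if count = pos then i
      else if c = '-' then pvGoA pos rest count (i + 1)
      else pvGoA pos rest (count + 1) (i + 1)

def MirnaPosTag (mirnaSeq : String) (pos : Int) : Int :=
  pvGoA pos mirnaSeq.toList.reverse 0 0

-- ===== PORT B =====
-- counts: for each position of the list, the number of non-dash characters before it
def pvCounts : List Char → Int → List Int
  | [], _ => []
  | c :: t, n => n :: pvCounts t (n + (if c ≠ '-' then 1 else 0))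

def MirnaPosTag_alt (mirnaSeq : String) (pos : Int) : Int :=
  let rev := mirnaSeq.toList.reverse
  let counts := pvCounts rev 0
  match (PySem.List.enumerate counts).find? (fun p => p.2 == pos) with
  | some (i, _) => i
  | none => 0

-- ===== PRECONDITION & SPEC =====
def Spec_MirnaPosTag (mirnaSeq : String) (pos : Int) (out : Int) : Prop := out = MirnaPosTag_alt mirnaSeq pos
instance (mirnaSeq : String) (pos : Int) (out : Int) : Decidable (Spec_MirnaPosTag mirnaSeq pos out) := by unfold Spec_MirnaPosTag; infer_instance

-- ===== CLAIM =====
def Claim_equal_MirnaPosTag : Prop := ∀ (mirnaSeq : String) (pos : Int), Dom_MirnaPosTag mirnaSeq pos → Spec_MirnaPosTag mirnaSeq pos (MirnaPosTag mirnaSeq pos)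

-- ===== LEMMAS AND PROOFS =====
theorem pvGoA_eq_find (pos : Int) :
    ∀ (l : List Char) (count i : Int),
      pvGoA pos l count i =
        (match (PySem.List.enumerate (pvCounts l count) i).find? (fun p => p.2 == pos) with
          | some (j, _) => j
          | none => 0) := by
  intro l
  induction l with
  | nil => intro count i; rfl
  | cons c t ih =>
      intro count i
      simp only [pvGoA, pvCounts, PySem.List.enumerate_cons, List.find?_cons]
      by_cases h : count = pos
      · simp [h]
      · have hb : ((i, count).2 == pos) = false := by simpa using h
        rw [hb, if_neg h]
        by_cases hc : c = '-'
        · simpa [hc] using ih count (i + 1)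
        · simpa [hc] using ih (count + 1) (i + 1)

-- ===== VERDICT =====
theorem MirnaPosTag_spec : Claim_equal_MirnaPosTag := by
  intro mirnaSeq pos _
  unfold Spec_MirnaPosTag MirnaPosTag MirnaPosTag_alt
  rw [pvGoA_eq_find]
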